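-- pv_equiv track=rewrite | github.com/emimorgar/circuit2parameters | circuit2parameters.py | serial_branch_finder
-- ===== SOURCE A (Python) =====
-- def serial_branch_finder(components_nodes):
--
--     #Calcular la frecuencia de cada nodo
--     nodes_frecuency = {}
--     for component_nodes in components_nodes:
--         for node in component_nodes:
--             if node in nodes_frecuency:
--                 nodes_frecuency[node] += 1
--             else:
--                 nodes_frecuency[node] = 1
--
--     #encontrar nodos que aparecen exactamente dos veces
--     serial_nodes = [num for num, count in nodes_frecuency.items() if count == 2]
--     #agrupa los elementos en serie
--     serial_components_set = []
--     for serial_node in serial_nodes: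
--         serial_components = []
--         for component, component_nodes in enumerate(components_nodes):
--             if serial_node in component_nodes:
--                 serial_components.append(component)
--         serial_components_set.append(serial_components)
--
--     unified = []
--     for pair in serial_components_set:
--         # Encuentra si alguno de los elementos ya está en un conjunto existente
--         found = None
--         for group in unified:
--             if any(item in group for item in pair):
--                 found = group
--                 break
--
--         # Si se encuentra un grupo existente con algún elemento en común, se agrega el par al grupo
--         if found:
--             found.update(pair)
--         else:
--             # Si no hay coincidencias, crea un nuevo conjunto para el par
--             unified.append(set(pair))
--
--     # Convertimos cada conjunto a una lista para el formato final
--     return [list(group) for group in unified]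
-- ===== SOURCE B (Python) =====
-- def serial_branch_finder(components_nodes):
--     # One pass builds node -> occurrence list of component indices (no per-node rescan);
--     # grouping uses a comp -> first-group index map instead of scanning all groups per pair.
--     occ = {}
--     for comp_idx, component_nodes in enumerate(components_nodes):
--         for node in component_nodes:
--             occ.setdefault(node, []).append(comp_idx)
--     groups = []
--     owner = {}
--     for ixs in occ.values():
--         if len(ixs) != 2:
--             continue
--         pair = list(dict.fromkeys(ixs))
--         gids = [owner[i] for i in pair if i in owner]
--         if gids:
--             g = min(gids)
--             groups[g].update(pair)
--             for i in pair:
--                 owner[i] = min(owner.get(i, g), g)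
--         else:
--             g = len(groups)
--             groups.append(set(pair))
--             for i in pair:
--                 owner[i] = g
--     return [list(group) for group in groups]
-- ===== Notes on version B (the rewrite author's own statement) =====
-- stated objective: alternative
-- what changed: B builds a node-to-occurrence-indices dict in the single enumeration pass (replacing A's per-serial-node rescan of all components) and merges pairs via a component-to-first-group index map (replacing A's scan of all existing groups per pair).
import Mathlib
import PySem

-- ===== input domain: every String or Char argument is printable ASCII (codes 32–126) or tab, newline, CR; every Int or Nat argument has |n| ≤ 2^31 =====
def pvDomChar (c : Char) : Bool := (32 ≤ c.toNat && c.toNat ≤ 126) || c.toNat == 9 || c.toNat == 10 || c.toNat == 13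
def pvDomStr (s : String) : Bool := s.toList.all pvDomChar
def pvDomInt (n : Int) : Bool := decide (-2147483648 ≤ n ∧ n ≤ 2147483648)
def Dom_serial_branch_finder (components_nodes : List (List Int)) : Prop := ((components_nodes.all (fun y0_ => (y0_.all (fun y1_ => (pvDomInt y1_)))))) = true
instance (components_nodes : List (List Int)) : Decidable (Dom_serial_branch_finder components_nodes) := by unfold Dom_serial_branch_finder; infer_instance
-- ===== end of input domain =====

-- B replaces A's per-serial-node rescan of all components by a node→occurrence index built in one
-- pass, and A's per-pair scan of all existing groups by a component→first-group map (objective: alternative).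
-- Group sets are modelled as PySem.Set (distinct elements, insertion order); the final
-- `list(group)` is ported exactly via a model of CPython's set table for nonnegative int
-- elements (pvListOfSet below), applied identically in both ports.

-- ===== PORT A =====
-- Shared helper of both ports: CPython's `list(group)` on a set built by a known insertion
-- sequence. Exact for sets of NONNEGATIVE ints (hash(x) = x), which group sets always are
-- (they hold component indices): open addressing, 9 linear probes, perturb chain,
-- growth x4 (x2 beyond 50000) when fill*5 >= mask*3 — iteration = ascending slot order.
def pvSetScan (t : List (Option Int)) (x : Int) : Nat → Nat → Option (Option Nat)
  | _, 0 => none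
  | i, Nat.succ c =>
    match t.getD i none with
    | none => some (some i)
    | some e => if e = x then some none else pvSetScan t x (i + 1) c

def pvSetAddLoop (t : List (Option Int)) (x : Int) : Nat → Nat → Nat → Option Nat
  | 0, _, _ => none
  | Nat.succ fuel, i, perturb =>
    let mask := t.length - 1
    let probes := if i + 9 ≤ mask then 9 else 0
    match pvSetScan t x i (probes + 1) with
    | some r => r
    | none =>
      let perturb' := perturb >>> 5
      pvSetAddLoop t x fuel ((i * 5 + 1 + perturb') % t.length) perturb'

def pvSetInsertOnly (t : List (Option Int)) (x : Int) : List (Option Int) :=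
  match pvSetAddLoop t x (2 * t.length + 64) (x.toNat % t.length) x.toNat with
  | some k => t.set k (some x)
  | none => t

def pvSetAddEntry (st : List (Option Int) × Nat) (x : Int) : List (Option Int) × Nat :=
  match pvSetAddLoop st.1 x (2 * st.1.length + 64) (x.toNat % st.1.length) x.toNat with
  | none => st
  | some k =>
    let t := st.1.set k (some x)
    let used := st.2 + 1
    if 3 * (t.length - 1) ≤ 5 * used then
      let minused := if 50000 < used then used * 2 else used * 4
      let newsize := max 8 (Nat.nextPowerOfTwo (minused + 1))
      ((t.filterMap id).foldl pvSetInsertOnly (List.replicate newsize none), used)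
    else (t, used)

def pvListOfSet (s : PySem.Set Int) : List Int :=
  ((s.foldl pvSetAddEntry (List.replicate 8 none, 0)).1).filterMap id

def serial_branch_finder (components_nodes : List (List Int)) : List (List Int) :=
  -- nodes_frecuency: `if node in d: d[node] += 1 else: d[node] = 1` is d.modify node 0 (·+1)
  let nodes_frecuency : PySem.Dict Int Int :=
    components_nodes.foldl
      (fun d component_nodes =>
        component_nodes.foldl (fun d node => d.modify node 0 (· + 1)) d)
      PySem.Dict.empty
  let serial_nodes : List Int :=
    (nodes_frecuency.items.filter (fun p => p.2 == 2)).map (fun p => p.1)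
  let serial_components_set : List (List Int) :=
    serial_nodes.map (fun serial_node =>
      (PySem.List.enumerate components_nodes 0).foldl
        (fun serial_components p =>
          if serial_node ∈ p.2 then serial_components ++ [p.1] else serial_components)
        [])
  -- `found` = first group sharing an item with pair; a found group contains an item, hence is
  -- nonempty, so Python's truthiness test `if found:` is exactly the match on findIdx?.
  let unified : List (PySem.Set Int) :=
    serial_components_set.foldl
      (fun unified pair =>
        match unified.findIdx? (fun group => pair.any (fun item => PySem.Set.contains group item)) with
        | some i => unified.set i (PySem.Set.update (unified.getD i []) pair)
        | none => unified ++ [PySem.Set.ofList pair])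
      []
  unified.map (fun group => pvListOfSet group)

-- ===== PORT B =====
def serial_branch_finder_alt (components_nodes : List (List Int)) : List (List Int) :=
  -- occ: `occ.setdefault(node, []).append(comp_idx)` is d.modify node [] (· ++ [comp_idx])
  let occ : PySem.Dict Int (List Int) :=
    (PySem.List.enumerate components_nodes 0).foldl
      (fun d p => p.2.foldl (fun d node => d.modify node [] (· ++ [p.1])) d)
      PySem.Dict.empty
  let res : List (PySem.Set Int) × PySem.Dict Int Int :=
    occ.values.foldl
      (fun st ixs =>
        if PySem.List.len ixs ≠ 2 then st
        else
          let pair := PySem.List.dedup ixs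
          let gids := pair.filterMap (fun i => st.2.get? i)
          match PySem.List.min? gids (fun x => x) with
          | some g =>
              (st.1.set g.toNat (PySem.Set.update (st.1.getD g.toNat []) pair),
               pair.foldl (fun ow i => ow.insert i (min (ow.getD i g) g)) st.2)
          | none =>
              (st.1 ++ [PySem.Set.ofList pair],
               pair.foldl (fun ow i => ow.insert i (PySem.List.len st.1)) st.2))
      ([], PySem.Dict.empty)
  res.1.map (fun group => pvListOfSet group)

-- ===== PRECONDITION & SPEC =====
def Spec_serial_branch_finder (components_nodes : List (List Int)) (out : List (List Int)) : Prop := out = serial_branch_finder_alt components_nodes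
instance (components_nodes : List (List Int)) (out : List (List Int)) : Decidable (Spec_serial_branch_finder components_nodes out) := by unfold Spec_serial_branch_finder; infer_instance

-- ===== CLAIM (what is proved, stated in full; the proofs are below) =====
def Claim_equal_serial_branch_finder : Prop := ∀ (components_nodes : List (List Int)), Dom_serial_branch_finder components_nodes → Spec_serial_branch_finder components_nodes (serial_branch_finder components_nodes)

-- ===== LEMMAS AND PROOFS =====

-- Proof-side names for the two grouping steps (definitionally the step functions of the ports).
def pvUnifyA (u : List (PySem.Set Int)) (pair : List Int) : List (PySem.Set Int) :=
  match u.findIdx? (fun group => pair.any (fun item => PySem.Set.contains group item)) with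
  | some i => u.set i (PySem.Set.update (u.getD i []) pair)
  | none => u ++ [PySem.Set.ofList pair]

def pvUnifyB (st : List (PySem.Set Int) × PySem.Dict Int Int) (pair : List Int) :
    List (PySem.Set Int) × PySem.Dict Int Int :=
  let gids := pair.filterMap (fun i => st.2.get? i)
  match PySem.List.min? gids (fun x => x) with
  | some g =>
      (st.1.set g.toNat (PySem.Set.update (st.1.getD g.toNat []) pair),
       pair.foldl (fun ow i => ow.insert i (min (ow.getD i g) g)) st.2)
  | none =>
      (st.1 ++ [PySem.Set.ofList pair],
       pair.foldl (fun ow i => ow.insert i (PySem.List.len st.1)) st.2)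

-- owner maps every component index to the position of the first group containing it
def pvOwnerInv (u : List (PySem.Set Int)) (ow : PySem.Dict Int Int) : Prop :=
  ∀ i : Int, ow.get? i = (u.findIdx? (fun g => PySem.Set.contains g i)).map (fun n => (n : Int))

-- the flattened node stream, the (node, index) stream, and the per-node occurrence list
def pvStream (cn : List (List Int)) : List Int := cn.flatMap id
def pvPStream (cn : List (List Int)) : List (Int × Int) :=
  (PySem.List.enumerate cn 0).flatMap (fun p => p.2.map (fun node => (node, p.1)))
def pvOccF (cn : List (List Int)) (k : Int) : List Int :=
  (PySem.List.enumerate cn 0).flatMap (fun p => List.replicate (p.2.count k) p.1)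

-- generic skip-fold
theorem pvFoldlSkip {α β σ : Type} (c : α → Prop) [DecidablePred c] (g : α → β) (f : σ → β → σ) :
    ∀ (l : List α) (st : σ),
      l.foldl (fun st x => if c x then st else f st (g x)) st
        = ((l.filter (fun x => !decide (c x))).map g).foldl f st := by
  intro l
  induction l with
  | nil => intro st; rfl
  | cons h t ih =>
    intro st
    by_cases hc : c h <;> simp [hc, ih]


theorem pvStream_eq (cn : List (List Int)) (s : Int) :
    (PySem.List.enumerate cn s).flatMap (fun p => p.2) = cn.flatMap id := by
  induction cn generalizing s with
  | nil => rfl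
  | cons h t ih => simp [PySem.List.enumerate_cons, ih]

theorem pvPStream_fst (cn : List (List Int)) :
    (pvPStream cn).map (fun q => q.1) = pvStream cn := by
  have h := pvStream_eq cn 0
  simp [pvPStream, pvStream, List.map_flatMap] at h ⊢
  simpa [Function.comp_def] using h


-- A's nested counting loop is the counter of the flattened node stream
theorem pvFreq_eq (cn : List (List Int)) :
    cn.foldl (fun d comp => comp.foldl (fun d node => d.modify node 0 (· + 1)) d) PySem.Dict.empty
      = PySem.Dict.counter (pvStream cn) := by
  rw [PySem.Dict.counter_eq_foldl, pvStream, List.foldl_flatMap]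
  rfl

-- B's nested occurrence loop is a single fold over the (node, index) stream
theorem pvOcc_eq (cn : List (List Int)) :
    (PySem.List.enumerate cn 0).foldl
        (fun d p => p.2.foldl (fun d node => d.modify node [] (· ++ [p.1])) d) PySem.Dict.empty
      = (pvPStream cn).foldl (fun d q => d.modify q.1 [] (· ++ [q.2])) PySem.Dict.empty := by
  rw [pvPStream, List.foldl_flatMap]
  simp [List.foldl_map]

theorem pvOcc_getD (cn : List (List Int)) (k : Int) :
    ((pvPStream cn).foldl (fun d q => d.modify q.1 [] (· ++ [q.2])) PySem.Dict.empty).getD k []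
      = pvOccF cn k := by
  rw [PySem.Dict.getD_foldl_modify_append]
  simp [pvPStream, pvOccF, List.filter_flatMap, List.map_flatMap]
  congr 1
  funext p
  simp only [List.filter_map, Function.comp_def, List.map_map]
  rw [List.eq_replicate_iff]
  refine ⟨by simp [List.count, List.countP_eq_length_filter], ?_⟩
  intro b hb; simp at hb; tauto

theorem pvOcc_keys (cn : List (List Int)) :
    ((pvPStream cn).foldl (fun d q => d.modify q.1 [] (· ++ [q.2])) PySem.Dict.empty).keys
      = PySem.Set.ofList (pvStream cn) := by
  have h := PySem.Dict.keys_foldl_modify_key (pvPStream cn) (fun q => q.1) []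
    (fun d q v => v ++ [q.2]) PySem.Dict.empty
  rw [h, ← pvPStream_fst cn]
  simp [PySem.Dict.keys_empty, PySem.Set.update_nil_left]

theorem pvOcc_nodup (cn : List (List Int)) :
    ((pvPStream cn).foldl (fun d q => d.modify q.1 [] (· ++ [q.2])) PySem.Dict.empty).keys.Nodup := by
  exact PySem.Dict.nodup_keys_foldl_modify_key (pvPStream cn) (fun q => q.1) ([] : List Int)
    (fun d q v => v ++ [q.2]) PySem.Dict.empty (by simp [PySem.Dict.keys_empty])

theorem pvAdd_mem {s : PySem.Set Int} {i : Int} (h : i ∈ s) : PySem.Set.add s i = s := by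
  simp [PySem.Set.add, PySem.Set.contains, h]

theorem pvAdd_not_mem {s : PySem.Set Int} {i : Int} (h : i ∉ s) : PySem.Set.add s i = s ++ [i] := by
  simp [PySem.Set.add, PySem.Set.contains, h]

theorem pvUpdate_replicate_mem {s : PySem.Set Int} {i : Int} (h : i ∈ s) (c : Nat) :
    PySem.Set.update s (List.replicate c i) = s := by
  induction c with
  | zero => rfl
  | succ n ih => simp only [List.replicate_succ, PySem.Set.update, List.foldl_cons, pvAdd_mem h] at ih ⊢; exact ih

theorem pvUpdate_replicate_not_mem {s : PySem.Set Int} {i : Int} (h : i ∉ s) {c : Nat} (hc : 0 < c) :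
    PySem.Set.update s (List.replicate c i) = s ++ [i] := by
  obtain ⟨n, rfl⟩ : ∃ n, c = n + 1 := ⟨c - 1, by omega⟩
  simp only [List.replicate_succ, PySem.Set.update, List.foldl_cons, pvAdd_not_mem h]
  have : i ∈ (s ++ [i] : List Int) := by simp
  exact pvUpdate_replicate_mem this n

theorem pvUpdate_append (s : PySem.Set Int) (xs ys : List Int) :
    PySem.Set.update s (xs ++ ys) = PySem.Set.update (PySem.Set.update s xs) ys := by
  simp [PySem.Set.update, List.foldl_append]

-- A's rescan of the components for a node equals the deduped occurrence list
theorem pvRescan_gen (k : Int) :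
    ∀ (L : List (Int × List Int)) (acc : List Int),
      (L.map (fun p => p.1)).Nodup → (∀ p ∈ L, p.1 ∉ acc) →
      L.foldl (fun acc p => if k ∈ p.2 then acc ++ [p.1] else acc) acc
        = PySem.Set.update acc (L.flatMap (fun p => List.replicate (p.2.count k) p.1)) := by
  intro L
  induction L with
  | nil => intro acc _ _; rfl
  | cons h t ih =>
    intro acc hnd hacc
    simp only [List.flatMap_cons, List.foldl_cons, pvUpdate_append]
    by_cases hk : k ∈ h.2
    · rw [if_pos hk, pvUpdate_replicate_not_mem (hacc h (by simp)) (List.count_pos_iff.mpr hk)]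
      · apply ih
        · simpa using hnd.of_cons
        · intro p hp
          simp only [List.mem_append, List.mem_singleton]
          push Not
          refine ⟨hacc p (by simp [hp]), ?_⟩
          simp only [List.map_cons, List.nodup_cons] at hnd
          exact fun e => hnd.1 (e ▸ (List.mem_map_of_mem hp))
    · rw [if_neg hk]
      have : h.2.count k = 0 := List.count_eq_zero.mpr hk
      rw [this]
      simp only [List.replicate_zero, PySem.Set.update]
      simp only [List.foldl_nil]
      apply ih
      · simpa using hnd.of_cons
      · exact fun p hp => hacc p (by simp [hp])

theorem pvCount_flatMap (k : Int) (l : List (Int × List Int)) (f : Int × List Int → List Int) :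
    (l.flatMap f).count k = (l.map (fun p => (f p).count k)).sum := by
  induction l with
  | nil => rfl
  | cons h t ih => simp [List.count_append, ih]

theorem pvOccF_length (cn : List (List Int)) (k : Int) :
    (pvOccF cn k).length = (pvStream cn).count k := by
  rw [pvOccF, pvStream, ← pvStream_eq cn 0]
  rw [List.length_flatMap, pvCount_flatMap k _ (fun p => p.2)]
  simp

theorem pvEnum_fst_nodup (cn : List (List Int)) :
    ((PySem.List.enumerate cn 0).map (fun p => p.1)).Nodup := by
  have h := PySem.List.map_fst_enumerate cn 0
  simp only [h]
  exact PySem.List.nodup_pyRange_one 0 _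

theorem pvRescan_eq (cn : List (List Int)) (k : Int) :
    (PySem.List.enumerate cn 0).foldl
        (fun acc p => if k ∈ p.2 then acc ++ [p.1] else acc) []
      = PySem.List.dedup (pvOccF cn k) := by
  rw [pvRescan_gen k _ [] (pvEnum_fst_nodup cn) (by simp)]
  rw [pvOccF]
  simp [PySem.Set.update_nil_left]

def pvPairs (cn : List (List Int)) : List (List Int) :=
  ((PySem.Set.ofList (pvStream cn)).filter (fun k => ((pvStream cn).count k : Int) == 2)).map
    (fun k => PySem.List.dedup (pvOccF cn k))

theorem pvPairsA_eq (cn : List (List Int)) :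
    (((PySem.Dict.counter (pvStream cn)).items.filter (fun p => p.2 == 2)).map (fun p => p.1)).map
        (fun k => (PySem.List.enumerate cn 0).foldl
          (fun acc p => if k ∈ p.2 then acc ++ [p.1] else acc) [])
      = pvPairs cn := by
  rw [PySem.Dict.items_counter, List.filter_map, List.map_map, List.map_map]
  rw [pvPairs]
  apply List.map_congr_left
  intro k _
  exact pvRescan_eq cn k

theorem pvPairsB_eq (cn : List (List Int)) :
    ((((pvPStream cn).foldl (fun d q => d.modify q.1 [] (· ++ [q.2])) PySem.Dict.empty).values.filter
        (fun ixs => !decide (PySem.List.len ixs ≠ 2))).map PySem.List.dedup)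
      = pvPairs cn := by
  set d := (pvPStream cn).foldl (fun d q => d.modify q.1 [] (· ++ [q.2])) PySem.Dict.empty with hd
  have hnd := pvOcc_nodup cn
  have hv : d.values = (PySem.Set.ofList (pvStream cn)).map (fun k => pvOccF cn k) := by
    have h := PySem.Dict.values_eq_map_keys d (by rw [hd]; exact hnd) []
    rw [h, pvOcc_keys]
    apply List.map_congr_left
    intro k _
    rw [hd]
    exact pvOcc_getD cn k
  rw [hv, List.filter_map, List.map_map, pvPairs]
  congr 1
  apply List.filter_congr
  intro k _
  have := pvOccF_length cn k
  simp only [Function.comp_def, PySem.List.len_eq, this]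
  by_cases h2 : (pvStream cn).count k = 2
  · simp [h2]
  · have h2' : ((pvStream cn).count k : Int) ≠ 2 := by exact_mod_cast h2
    simp [h2']




theorem pvInsFold (G : Int → Int) (g : Int) :
    ∀ (pair : List Int), pair.Nodup → ∀ (ow0 : PySem.Dict Int Int) (x : Int),
      (pair.foldl (fun ow i => ow.insert i (G (ow.getD i g))) ow0).get? x
        = if x ∈ pair then some (G (ow0.getD x g)) else ow0.get? x := by
  intro pair
  induction pair with
  | nil => intro _ ow0 x; simp
  | cons h t ih =>
    intro hnd ow0 x
    simp only [List.foldl_cons]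
    rw [ih hnd.of_cons]
    simp only [List.nodup_cons] at hnd
    by_cases hxt : x ∈ t
    · have hxh : x ≠ h := fun e => hnd.1 (e ▸ hxt)
      simp [hxt, PySem.Dict.getD_insert, hxh]
    · by_cases hxh : x = h
      · subst hxh
        simp [hxt]
      · simp [hxt, hxh, PySem.Dict.get?_insert]

theorem pvFindIdx?_congr {α β : Type} (p : α → Bool) (q : β → Bool) :
    ∀ (l : List α) (l' : List β), l.map p = l'.map q → l.findIdx? p = l'.findIdx? q := by
  intro l
  induction l with
  | nil => intro l' h; cases l' <;> simp_all
  | cons a t ih =>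
    intro l' h
    cases l' with
    | nil => simp at h
    | cons b t' =>
      simp only [List.map_cons, List.cons.injEq] at h
      simp only [List.findIdx?_cons, h.1, ih t' h.2]

theorem pvInsFoldMin (g : Int) (pair : List Int) (h : pair.Nodup) (ow0 : PySem.Dict Int Int) (x : Int) :
    (pair.foldl (fun ow i => ow.insert i (min (ow.getD i g) g)) ow0).get? x
      = if x ∈ pair then some (min (ow0.getD x g) g) else ow0.get? x :=
  pvInsFold (fun z => min z g) g pair h ow0 x

theorem pvInsFoldConst (c : Int) (pair : List Int) (h : pair.Nodup) (ow0 : PySem.Dict Int Int) (x : Int) :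
    (pair.foldl (fun ow i => ow.insert i c) ow0).get? x
      = if x ∈ pair then some c else ow0.get? x :=
  pvInsFold (fun _ => c) 0 pair h ow0 x

theorem pvUstep (u : List (PySem.Set Int)) (ow : PySem.Dict Int Int) (pair : List Int)
    (hpair : pair.Nodup) (hinv : pvOwnerInv u ow) :
    pvUnifyA u pair = (pvUnifyB (u, ow) pair).1 ∧
      pvOwnerInv (pvUnifyA u pair) ((pvUnifyB (u, ow) pair).2) := by
  cases hJ : u.findIdx? (fun group => pair.any (fun item => PySem.Set.contains group item)) with
  | none =>
    have hnone : ∀ i ∈ pair, u.findIdx? (fun g => PySem.Set.contains g i) = none := by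
      intro i hi
      rw [List.findIdx?_eq_none_iff]
      intro g hg
      have h1 := List.findIdx?_eq_none_iff.mp hJ g hg
      simp only [List.any_eq_false] at h1
      simpa using h1 i hi
    have hgnil : pair.filterMap (fun i => ow.get? i) = [] := by
      rw [List.filterMap_eq_nil_iff]
      intro i hi
      rw [hinv i, hnone i hi]
      rfl
    have hmin : PySem.List.min? (pair.filterMap (fun i => ow.get? i)) (fun x => x) = none := by
      rw [hgnil]; rfl
    constructor
    · simp only [pvUnifyA, pvUnifyB, hJ, hmin]
    · simp only [pvUnifyA, pvUnifyB, hJ, hmin]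
      intro x
      rw [pvInsFoldConst _ _ hpair]
      rw [List.findIdx?_append]
      by_cases hx : x ∈ pair
      · simp only [hx, if_pos]
        have h0 : (u ++ [PySem.Set.ofList pair] : List (PySem.Set Int)) = u ++ [PySem.Set.ofList pair] := rfl
        have h1 : u.findIdx? (fun g => PySem.Set.contains g x) = none := hnone x hx
        have hc : PySem.Set.contains (PySem.Set.ofList pair) x = true := by
          rw [PySem.Set.contains_iff, PySem.Set.mem_ofList]; exact hx
        have h2 : List.findIdx? (fun g => PySem.Set.contains g x) [PySem.Set.ofList pair] = some 0 := by
          rw [List.findIdx?_cons, hc]; rfl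
        rw [h1, h2]
        simp [PySem.List.len_eq]
      · simp only [hx, if_neg, not_false_iff]
        have hc : PySem.Set.contains (PySem.Set.ofList pair) x = false := by
          rw [Bool.eq_false_iff]
          intro hcc
          rw [PySem.Set.contains_iff, PySem.Set.mem_ofList] at hcc
          exact hx hcc
        have h2 : List.findIdx? (fun g => PySem.Set.contains g x) [PySem.Set.ofList pair] = none := by
          rw [List.findIdx?_cons, hc]; rfl
        rw [h2, hinv x]
        cases u.findIdx? (fun g => PySem.Set.contains g x) <;> rfl
  | some j =>
    obtain ⟨hj, hpj, hminj⟩ := List.findIdx?_eq_some_iff_getElem.mp hJ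
    simp only [List.any_eq_true] at hpj
    obtain ⟨i0, hi0p, hi0⟩ := hpj
    -- lower bound: any first-group index of a pair element is ≥ j
    have hlow : ∀ i ∈ pair, ∀ k, u.findIdx? (fun g => PySem.Set.contains g i) = some k → j ≤ k := by
      intro i hi k hk
      obtain ⟨hk1, hk2, _⟩ := List.findIdx?_eq_some_iff_getElem.mp hk
      by_contra hlt
      have := hminj k (by omega)
      simp only [List.any_eq_true] at this
      exact this ⟨i, hi, hk2⟩
    -- the first-group index of i0 is exactly j
    have hF0 : u.findIdx? (fun g => PySem.Set.contains g i0) = some j := by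
      cases hF : u.findIdx? (fun g => PySem.Set.contains g i0) with
      | none =>
        have := List.findIdx?_eq_none_iff.mp hF u[j] (u.getElem_mem hj)
        rw [this] at hi0; exact absurd hi0 (by simp)
      | some k =>
        obtain ⟨hk1, hk2, hk3⟩ := List.findIdx?_eq_some_iff_getElem.mp hF
        have hjk := hlow i0 hi0p k hF
        have : ¬ (j < k) := fun hlt => hk3 j hlt hi0
        have : k = j := by omega
        rw [this]
    have hjmem : ((j : Nat) : Int) ∈ pair.filterMap (fun i => ow.get? i) := by
      rw [List.mem_filterMap]
      exact ⟨i0, hi0p, by rw [hinv i0, hF0]; rfl⟩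
    have hglow : ∀ x ∈ pair.filterMap (fun i => ow.get? i), ((j : Nat) : Int) ≤ x := by
      intro x hx
      rw [List.mem_filterMap] at hx
      obtain ⟨i, hip, hgi⟩ := hx
      rw [hinv i] at hgi
      cases hF : u.findIdx? (fun g => PySem.Set.contains g i) with
      | none => rw [hF] at hgi; exact absurd hgi (by simp)
      | some k =>
        rw [hF] at hgi
        have hkx : ((k : Nat) : Int) = x := by simpa using hgi
        have := hlow i hip k hF
        omega
    have hmin : PySem.List.min? (pair.filterMap (fun i => ow.get? i)) (fun x => x) = some ((j : Nat) : Int) := by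
      cases hm : PySem.List.min? (pair.filterMap (fun i => ow.get? i)) (fun x => x) with
      | none =>
        rw [PySem.List.min?_eq_none_iff] at hm
        rw [hm] at hjmem; exact absurd hjmem (by simp)
      | some m =>
        have h1 := PySem.List.min?_mem hm
        have h2 := PySem.List.min?_isMin hm _ hjmem
        have h3 := hglow m h1
        have : m = ((j : Nat) : Int) := le_antisymm h2 h3
        rw [this]
    have htn : (((j : Nat) : Int)).toNat = j := Int.toNat_natCast j
    constructor
    · simp only [pvUnifyA, pvUnifyB, hJ, hmin, htn]
    · simp only [pvUnifyA, pvUnifyB, hJ, hmin, htn]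
      intro x
      rw [pvInsFoldMin _ _ hpair]
      by_cases hx : x ∈ pair
      · simp only [hx, if_pos]
        -- new first group of x is j
        have hRHS : (u.set j (PySem.Set.update (u.getD j []) pair)).findIdx?
            (fun g => PySem.Set.contains g x) = some j := by
          rw [List.findIdx?_eq_some_iff_getElem]
          refine ⟨by simpa using hj, ?_, ?_⟩
          · rw [List.getElem_set_self]
            rw [List.getD_eq_getElem u [] hj]
            simp only [PySem.Set.contains_iff, PySem.Set.mem_update]
            exact Or.inr hx
          · intro m hm
            rw [List.getElem_set_ne (by omega)]
            have := hminj m hm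
            simp only [List.any_eq_true] at this
            simp only [Bool.not_eq_true]
            rw [← Bool.not_eq_true]
            exact fun hc => this ⟨x, hx, hc⟩
        rw [hRHS]
        rw [PySem.Dict.getD_eq_get?_getD, hinv x]
        cases hF : u.findIdx? (fun g => PySem.Set.contains g x) with
        | none => simp
        | some k =>
          have hjk := hlow x hx k hF
          have hle : ((j : Nat) : Int) ≤ ((k : Nat) : Int) := by exact_mod_cast hjk
          simp [min_eq_right hle]
      · simp only [hx, if_neg, not_false_iff]
        have hco : (u.set j (PySem.Set.update (u.getD j []) pair)).findIdx?
            (fun g => PySem.Set.contains g x) = u.findIdx? (fun g => PySem.Set.contains g x) := by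
          apply pvFindIdx?_congr
          apply List.ext_getElem (by simp)
          intro m hm1 hm2
          simp only [List.getElem_map]
          by_cases hmj : m = j
          · subst hmj
            rw [List.getElem_set_self (by simpa using hm1)]
            rw [List.getD_eq_getElem u [] hj]
            rw [Bool.eq_iff_iff]
            simp only [PySem.Set.contains_iff, PySem.Set.mem_update]
            simp [hx]
          · rw [List.getElem_set_ne (by omega)]
        rw [hinv x, hco]

theorem pvUfold : ∀ (pairs : List (List Int)) (u : List (PySem.Set Int)) (ow : PySem.Dict Int Int),
    (∀ p ∈ pairs, p.Nodup) → pvOwnerInv u ow →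
    pairs.foldl pvUnifyA u = (pairs.foldl pvUnifyB (u, ow)).1 ∧
      pvOwnerInv (pairs.foldl pvUnifyA u) ((pairs.foldl pvUnifyB (u, ow)).2) := by
  intro pairs
  induction pairs with
  | nil => intro u ow _ hinv; exact ⟨rfl, hinv⟩
  | cons p t ih =>
    intro u ow hnd hinv
    obtain ⟨h1, h2⟩ := pvUstep u ow p (hnd p (by simp)) hinv
    simp only [List.foldl_cons]
    rw [show pvUnifyB (u, ow) p = ((pvUnifyB (u, ow) p).1, (pvUnifyB (u, ow) p).2) from rfl]
    rw [h1] at h2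
    rw [h1]
    exact ih _ _ (fun q hq => hnd q (by simp [hq])) h2

theorem pvMain (cn : List (List Int)) : serial_branch_finder cn = serial_branch_finder_alt cn := by
  have e1 : serial_branch_finder cn =
      (List.foldl pvUnifyA []
        (List.map
          (fun serial_node => (PySem.List.enumerate cn 0).foldl
            (fun (serial_components : List Int) (p : Int × List Int) =>
              if serial_node ∈ p.2 then serial_components ++ [p.1] else serial_components) [])
          (List.map (fun (p : Int × Int) => p.1)
            (List.filter (fun (p : Int × Int) => p.2 == 2)
              (List.foldl
                (fun (d : PySem.Dict Int Int) (component_nodes : List Int) =>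
                  component_nodes.foldl (fun d node => d.modify node 0 (· + 1)) d)
                PySem.Dict.empty cn).items)))).map (fun group => pvListOfSet group) := rfl
  rw [pvFreq_eq, pvPairsA_eq] at e1
  have e2 : serial_branch_finder_alt cn =
      ((List.foldl
          (fun (st : List (PySem.Set Int) × PySem.Dict Int Int) (ixs : List Int) =>
            if PySem.List.len ixs ≠ 2 then st else pvUnifyB st (PySem.List.dedup ixs))
          ([], PySem.Dict.empty)
          (PySem.Dict.values
            (List.foldl
              (fun (d : PySem.Dict Int (List Int)) (p : Int × List Int) =>
                p.2.foldl (fun d node => d.modify node [] (· ++ [p.1])) d)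
              PySem.Dict.empty (PySem.List.enumerate cn 0)))).1).map
        (fun group => pvListOfSet group) := rfl
  rw [pvOcc_eq, pvFoldlSkip (fun ixs => PySem.List.len ixs ≠ 2) PySem.List.dedup pvUnifyB,
    pvPairsB_eq] at e2
  rw [e1, e2]
  have hnd : ∀ p ∈ pvPairs cn, p.Nodup := by
    intro p hp
    rw [pvPairs, List.mem_map] at hp
    obtain ⟨k, _, rfl⟩ := hp
    simp only [PySem.List.dedup_eq_ofList]
    exact PySem.Set.nodup_ofList _
  have hinv : pvOwnerInv [] PySem.Dict.empty := fun i => rfl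
  obtain ⟨h, _⟩ := pvUfold (pvPairs cn) [] PySem.Dict.empty hnd hinv
  rw [h]

-- ===== VERDICT (by name: the statement is the Claim_ definition above) =====
theorem serial_branch_finder_spec : Claim_equal_serial_branch_finder := by
  intro cn _
  unfold Spec_serial_branch_finder
  exact pvMain cn
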